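-- pv_equiv track=rewrite | github.com/NUSTM/COQE | Baseline_Systems/data_generator_utils/data_generator.py | create_sequence_keyword_feature
-- ===== SOURCE A (Python) =====
-- def create_sequence_keyword_feature(sequence_token, sequence_pos, keyword_vocab, lang="en"):
--     """
--     :param sequence_token:
--     :param sequence_pos:
--     :param keyword_vocab: a list of list
--     :param lang:
--     :return:
--     """
--     comparative_dict = {"JJR", "JJS", "RBR", "RBS"}
--     sequence_keyword = ["NO"] * len(sequence_token)
--     for index in range(len(sequence_token)):
--         if lang == "en" and sequence_pos[index] in comparative_dict:
--             sequence_keyword[index] = "YES"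
--
--     for keyword in keyword_vocab:
--         for index in range(len(sequence_token)):
--             error_flag = False
--             if sequence_token[index] == keyword[0]:
--                 for t in range(len(keyword)):
--                     if (index + t) < len(sequence_token) and keyword[t] != sequence_token[index + t] and keyword[t] != "<word>":
--                         error_flag = True
--             else:
--                 error_flag = True
--
--             if error_flag:
--                 continue
--
--             for t in range(len(keyword)):
--                 sequence_keyword[index + t] = "YES"
--
--     return sequence_keyword
-- ===== SOURCE B (Python) =====
-- def create_sequence_keyword_feature(sequence_token, sequence_pos, keyword_vocab, lang="en"):
--     n = len(sequence_token)
--     comparative = {"JJR", "JJS", "RBR", "RBS"}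
--     yes = [False] * n
--     if lang == "en":
--         for i in range(n):
--             if sequence_pos[i] in comparative:
--                 yes[i] = True
--     by_first = {}
--     for kw in keyword_vocab:
--         if kw:
--             by_first.setdefault(kw[0], []).append(kw)
--     for i in range(n):
--         for kw in by_first.get(sequence_token[i], ()):
--             m = len(kw)
--             if m <= n - i and all(kw[t] == sequence_token[i + t] or kw[t] == "<word>" for t in range(1, m)):
--                 for t in range(i, i + m):
--                     yes[t] = True
--     return ["YES" if f else "NO" for f in yes]
-- ===== Notes on version B (the rewrite author's own statement) =====
-- stated objective: faster
-- what changed: B builds a dict indexing keywords by their first token once and scans each position a single time against only the candidate keywords starting with that token (marking hits in a boolean array), instead of A's scan of every position for every keyword; the inputs where A raises (short POS list, empty keyword, keyword match overhanging the end) are excluded by Pre_.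
import Mathlib
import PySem

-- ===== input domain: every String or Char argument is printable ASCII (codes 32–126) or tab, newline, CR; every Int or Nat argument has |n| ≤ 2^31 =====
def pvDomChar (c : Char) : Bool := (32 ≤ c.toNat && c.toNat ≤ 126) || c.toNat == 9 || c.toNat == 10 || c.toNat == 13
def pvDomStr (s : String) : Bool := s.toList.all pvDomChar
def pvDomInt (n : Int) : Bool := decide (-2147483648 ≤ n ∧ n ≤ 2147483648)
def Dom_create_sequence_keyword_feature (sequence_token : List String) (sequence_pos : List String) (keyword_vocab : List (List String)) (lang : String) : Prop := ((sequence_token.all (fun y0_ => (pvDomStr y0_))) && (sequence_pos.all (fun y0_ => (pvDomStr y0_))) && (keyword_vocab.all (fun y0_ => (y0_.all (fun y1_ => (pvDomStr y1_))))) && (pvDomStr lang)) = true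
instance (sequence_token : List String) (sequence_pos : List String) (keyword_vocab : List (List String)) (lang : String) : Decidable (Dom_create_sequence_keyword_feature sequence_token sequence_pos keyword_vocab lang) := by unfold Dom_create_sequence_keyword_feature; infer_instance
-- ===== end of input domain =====

-- B replaces A's per-keyword full scans by a dict of keywords indexed by first token, scanning each
-- position once against its candidates only (objective: faster).

-- ===== PORT A =====
-- A-side helper: the Python loop computing `error_flag` for one keyword at one position.
def errFlagA (sequence_token : List String) (keyword : List String) (index : Nat) : Bool :=
  if sequence_token.getD index "" == keyword.getD 0 "" then
    (List.range keyword.length).foldl (fun ef t =>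
      if decide (index + t < sequence_token.length) &&
         keyword.getD t "" != sequence_token.getD (index + t) "" &&
         keyword.getD t "" != "<word>" then true else ef) false
  else true

def create_sequence_keyword_feature (sequence_token : List String) (sequence_pos : List String) (keyword_vocab : List (List String)) (lang : String) : List String :=
  let n := sequence_token.length
  let comparative_dict := PySem.Set.ofList ["JJR", "JJS", "RBR", "RBS"]
  let sequence_keyword := List.replicate n "NO"
  let sequence_keyword := (List.range n).foldl (fun sk index =>
      if lang == "en" && PySem.Set.contains comparative_dict (sequence_pos.getD index "") then
        sk.set index "YES" else sk) sequence_keyword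
  keyword_vocab.foldl (fun sk keyword =>
    (List.range n).foldl (fun sk index =>
      let error_flag := errFlagA sequence_token keyword index
      if error_flag then sk
      else (List.range keyword.length).foldl (fun sk t => sk.set (index + t) "YES") sk) sk)
    sequence_keyword

-- ===== PORT B =====
-- B-side helper: the Python test `m <= n - i and all(kw[t] == sequence_token[i+t] or kw[t] == "<word>" for t in range(1, m))`.
def candOkB (sequence_token : List String) (kw : List String) (i : Nat) : Bool :=
  decide (kw.length ≤ sequence_token.length - i) &&
  (List.range' 1 (kw.length - 1)).all (fun t =>
    kw.getD t "" == sequence_token.getD (i + t) "" || kw.getD t "" == "<word>")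

def create_sequence_keyword_feature_alt (sequence_token : List String) (sequence_pos : List String) (keyword_vocab : List (List String)) (lang : String) : List String :=
  let n := sequence_token.length
  let comparative := PySem.Set.ofList ["JJR", "JJS", "RBR", "RBS"]
  let yes : List Bool := List.replicate n false
  let yes := if lang == "en" then
      (List.range n).foldl (fun y i =>
        if PySem.Set.contains comparative (sequence_pos.getD i "") then y.set i true else y) yes
    else yes
  let by_first : PySem.Dict String (List (List String)) :=
    keyword_vocab.foldl (fun d kw =>
      if kw.isEmpty then d
      else d.insert (kw.getD 0 "") (d.getD (kw.getD 0 "") [] ++ [kw])) PySem.Dict.empty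
  let yes := (List.range n).foldl (fun y i =>
      (by_first.getD (sequence_token.getD i "") []).foldl (fun y kw =>
        if candOkB sequence_token kw i then
          (List.range' i kw.length).foldl (fun y t => y.set t true) y
        else y) y) yes
  yes.map (fun f => if f then "YES" else "NO")

-- ===== PRECONDITION & SPEC =====
-- The Python A "matches keyword kw at position i" test (first token equal, every in-range later
-- token equal or the "<word>" wildcard), as a Bool predicate on the input.
def pvMatchesAtB (sequence_token : List String) (kw : List String) (i : Nat) : Bool :=
  (sequence_token.getD i "" == kw.getD 0 "") &&
  (List.range kw.length).all (fun t =>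
    !(decide (i + t < sequence_token.length)) ||
    kw.getD t "" == sequence_token.getD (i + t) "" || kw.getD t "" == "<word>")

-- Pre_ is exactly the set of inputs on which the Python A returns: A raises IndexError when
-- lang == "en" and sequence_pos is shorter than sequence_token, when some keyword is empty and the
-- token list is not (keyword[0]), and when a keyword matches at a position but overhangs the end of
-- the token list (A then assigns past the end of sequence_keyword).
def Pre_create_sequence_keyword_feature (sequence_token : List String) (sequence_pos : List String) (keyword_vocab : List (List String)) (lang : String) : Prop :=
  (lang = "en" → sequence_token.length ≤ sequence_pos.length) ∧
  (0 < sequence_token.length → ∀ kw ∈ keyword_vocab, kw ≠ []) ∧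
  (∀ kw ∈ keyword_vocab, ∀ i < sequence_token.length,
    pvMatchesAtB sequence_token kw i = true → i + kw.length ≤ sequence_token.length)
instance (sequence_token : List String) (sequence_pos : List String) (keyword_vocab : List (List String)) (lang : String) : Decidable (Pre_create_sequence_keyword_feature sequence_token sequence_pos keyword_vocab lang) := by unfold Pre_create_sequence_keyword_feature; infer_instance

def pvWitness_create_sequence_keyword_feature : List String × List String × List (List String) × String :=
  (["no", "better", "than"], ["DT", "JJR", "IN"], [["better", "than"], ["worse"]], "en")

def Spec_create_sequence_keyword_feature (sequence_token : List String) (sequence_pos : List String) (keyword_vocab : List (List String)) (lang : String) (out : List String) : Prop := out = create_sequence_keyword_feature_alt sequence_token sequence_pos keyword_vocab lang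
instance (sequence_token : List String) (sequence_pos : List String) (keyword_vocab : List (List String)) (lang : String) (out : List String) : Decidable (Spec_create_sequence_keyword_feature sequence_token sequence_pos keyword_vocab lang out) := by unfold Spec_create_sequence_keyword_feature; infer_instance

-- ===== CLAIM (what is proved, stated in full; the proofs are below) =====
def Claim_equal_create_sequence_keyword_feature : Prop := ∀ (sequence_token : List String) (sequence_pos : List String) (keyword_vocab : List (List String)) (lang : String), Dom_create_sequence_keyword_feature sequence_token sequence_pos keyword_vocab lang → Pre_create_sequence_keyword_feature sequence_token sequence_pos keyword_vocab lang → Spec_create_sequence_keyword_feature sequence_token sequence_pos keyword_vocab lang (create_sequence_keyword_feature sequence_token sequence_pos keyword_vocab lang)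

-- ===== LEMMAS AND PROOFS =====

-- replicate as a map over range
theorem pv_replicate_eq_map (n : Nat) {α : Type} (v : α) :
    List.replicate n v = (List.range n).map (fun _ => v) := by
  simp

-- set on a map over range
theorem pv_map_range_set {α : Type} (n t : Nat) (g : Nat → α) (v : α) (_ht : t < n) :
    ((List.range n).map g).set t v = (List.range n).map (fun j => if j = t then v else g j) := by
  apply List.ext_getElem (by simp)
  intro j h1 h2
  simp only [List.getElem_set, List.getElem_map, List.getElem_range]
  by_cases hjt : j = t
  · simp [hjt]
  · simp [hjt, Ne.symm hjt]

-- marking an interval of positions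
theorem pv_foldl_set_range' {α : Type} (n : Nat) (v : α) :
    ∀ (m i : Nat) (g : Nat → α), i + m ≤ n →
    (List.range' i m).foldl (fun y t => y.set t v) ((List.range n).map g)
      = (List.range n).map (fun j => if i ≤ j ∧ j < i + m then v else g j) := by
  intro m
  induction m with
  | zero =>
    intro i g _
    simp only [List.range', List.foldl_nil]
    apply List.map_congr_left; intro j _
    rw [if_neg (by omega)]
  | succ m ih =>
    intro i g h
    rw [List.range'_succ, List.foldl_cons, pv_map_range_set n i g v (by omega), ih (i+1) _ (by omega)]
    apply List.map_congr_left; intro j _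
    by_cases h1 : i + 1 ≤ j ∧ j < i + 1 + m
    · rw [if_pos h1, if_pos (by omega)]
    · rw [if_neg h1]
      by_cases h2 : j = i
      · rw [if_pos h2, if_pos (by omega)]
      · rw [if_neg h2, if_neg (by omega)]

-- A marks the interval with `range m` and an offset; same statement
theorem pv_foldl_set_range {α : Type} (n : Nat) (v : α) (m i : Nat) (g : Nat → α) (h : i + m ≤ n) :
    (List.range m).foldl (fun y t => y.set (i + t) v) ((List.range n).map g)
      = (List.range n).map (fun j => if i ≤ j ∧ j < i + m then v else g j) := by
  rw [← pv_foldl_set_range' n v m i g h, List.range'_eq_map_range, List.foldl_map]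

-- the error-flag accumulation loop is an `any`
theorem pv_foldl_or_ite (p : Nat → Bool) : ∀ (m : Nat) (b : Bool),
    (List.range m).foldl (fun ef t => if p t then true else ef) b = (b || (List.range m).any p) := by
  intro m
  induction m with
  | zero => intro b; simp
  | succ m ih =>
    intro b
    rw [List.range_succ, List.foldl_append, List.any_append, ih]
    cases hp : p m <;> simp [hp]

-- error_flag is the negation of the match predicate
theorem pv_errFlagA_eq (tok kw : List String) (i : Nat) :
    errFlagA tok kw i = !(pvMatchesAtB tok kw i) := by
  unfold errFlagA pvMatchesAtB
  rw [pv_foldl_or_ite]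
  by_cases h : (tok.getD i "" == kw.getD 0 "") = true
  · rw [if_pos h, Bool.false_or, h, Bool.true_and, List.not_all_eq_any_not]
    congr 1
    funext t
    simp [Bool.not_or, bne]
  · have h' : (tok.getD i "" == kw.getD 0 "") = false := by simpa using h
    rw [if_neg h, h']
    simp

-- A's per-keyword position loop
theorem pv_A_kw_loop (tok : List String) (kw : List String)
    (hkw : ∀ i < tok.length, pvMatchesAtB tok kw i = true → i + kw.length ≤ tok.length) :
    ∀ (m : Nat) (g : Nat → String), m ≤ tok.length →
    (List.range m).foldl (fun sk index =>
        let error_flag := errFlagA tok kw index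
        if error_flag then sk
        else (List.range kw.length).foldl (fun sk t => sk.set (index + t) "YES") sk)
      ((List.range tok.length).map g)
      = (List.range tok.length).map (fun j =>
          if (List.range m).any (fun i => pvMatchesAtB tok kw i && decide (i ≤ j) && decide (j < i + kw.length))
          then "YES" else g j) := by
  intro m
  induction m with
  | zero => intro g _; simp
  | succ m ih =>
    intro g h
    rw [List.range_succ, List.foldl_append, ih g (by omega), List.foldl_cons, List.foldl_nil]
    simp only [pv_errFlagA_eq]
    cases hm : pvMatchesAtB tok kw m with
    | false =>
      simp only [Bool.not_false, if_pos]
      apply List.map_congr_left; intro j _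
      rw [List.any_append]
      simp [hm]
    | true =>
      simp only [Bool.not_true, Bool.false_eq_true, if_false]
      rw [pv_foldl_set_range tok.length "YES" kw.length m _ (hkw m (by omega) hm)]
      apply List.map_congr_left; intro j hj
      rw [List.any_append]
      simp only [List.any_cons, List.any_nil, Bool.or_false, hm, Bool.true_and]
      by_cases h1 : m ≤ j ∧ j < m + kw.length
      · rw [if_pos h1, if_pos (by simp [h1.1, h1.2])]
      · rw [if_neg h1]
        have : (decide (m ≤ j) && decide (j < m + kw.length)) = false := by
          rcases Classical.em (m ≤ j) with h2 | h2 <;> simp [h2] <;> omega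
        rw [this, Bool.or_false]

-- A's keyword-vocabulary loop
theorem pv_A_kv_loop (tok : List String) :
    ∀ (kv : List (List String)),
    (∀ kw ∈ kv, ∀ i < tok.length, pvMatchesAtB tok kw i = true → i + kw.length ≤ tok.length) →
    ∀ (g : Nat → String),
    kv.foldl (fun sk keyword =>
        (List.range tok.length).foldl (fun sk index =>
          let error_flag := errFlagA tok keyword index
          if error_flag then sk
          else (List.range keyword.length).foldl (fun sk t => sk.set (index + t) "YES") sk) sk)
      ((List.range tok.length).map g)
      = (List.range tok.length).map (fun j =>
          if kv.any (fun kw => (List.range tok.length).any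
              (fun i => pvMatchesAtB tok kw i && decide (i ≤ j) && decide (j < i + kw.length)))
          then "YES" else g j) := by
  intro kv
  induction kv with
  | nil => intro _ g; simp
  | cons kw kvs ih =>
    intro h g
    rw [List.foldl_cons, pv_A_kw_loop tok kw (h kw (by simp)) tok.length g (le_refl _),
      ih (fun k hk => h k (by simp [hk])) _]
    apply List.map_congr_left; intro j _
    simp only [List.any_cons]
    by_cases h1 : ((List.range tok.length).any (fun i => pvMatchesAtB tok kw i && decide (i ≤ j) && decide (j < i + kw.length))) = true <;>
      by_cases h2 : (kvs.any (fun kw => (List.range tok.length).any (fun i => pvMatchesAtB tok kw i && decide (i ≤ j) && decide (j < i + kw.length)))) = true <;>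
      simp [h1, h2]

-- the guarded single-position marking loop (POS marking, both sides)
theorem pv_foldl_guard_set {α : Type} (n : Nat) (p : Nat → Bool) (v : α) :
    ∀ (m : Nat) (g : Nat → α), m ≤ n →
    (List.range m).foldl (fun y i => if p i then y.set i v else y) ((List.range n).map g)
      = (List.range n).map (fun j => if j < m ∧ p j = true then v else g j) := by
  intro m
  induction m with
  | zero => intro g _; simp
  | succ m ih =>
    intro g h
    rw [List.range_succ, List.foldl_append, ih g (by omega), List.foldl_cons, List.foldl_nil]
    cases hp : p m with
    | false =>
      simp only [Bool.false_eq_true, if_false]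
      apply List.map_congr_left; intro j _
      by_cases h2 : j = m
      · rw [if_neg (by rw [h2]; simp [hp]), if_neg (by rw [h2]; simp [hp])]
      · by_cases h1 : j < m ∧ p j = true
        · rw [if_pos h1, if_pos ⟨by omega, h1.2⟩]
        · rw [if_neg h1, if_neg (fun hc => h1 ⟨by omega, hc.2⟩)]
    | true =>
      simp only [if_pos]
      rw [pv_map_range_set n m _ v (by omega)]
      apply List.map_congr_left; intro j _
      by_cases h2 : j = m
      · rw [if_pos h2, if_pos (by constructor <;> [omega; (rw [h2]; exact hp)])]
      · rw [if_neg h2]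
        by_cases h1 : j < m ∧ p j = true
        · rw [if_pos h1, if_pos ⟨by omega, h1.2⟩]
        · rw [if_neg h1, if_neg (fun hc => h1 ⟨by omega, hc.2⟩)]

-- combining one more guarded mark with an accumulated condition
theorem pv_if_or (a b : Bool) (x : Bool) :
    (if a = true then true else if b = true then true else x) = (if (b || a) = true then true else x) := by
  cases a <;> cases b <;> simp

-- bucket dictionary characterisation: membership in a bucket of B's keyword index
theorem pv_bucket_mem :
    ∀ (kv : List (List String)) (d : PySem.Dict String (List (List String))) (s : String) (kw' : List String),
    (kw' ∈ (kv.foldl (fun d kw =>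
        if kw.isEmpty then d
        else d.insert (kw.getD 0 "") (d.getD (kw.getD 0 "") [] ++ [kw])) d).getD s []) ↔
      kw' ∈ d.getD s [] ∨ (kw' ∈ kv ∧ kw' ≠ [] ∧ kw'.getD 0 "" = s) := by
  intro kv
  induction kv with
  | nil => intro d s kw'; simp
  | cons kw kvs ih =>
    intro d s kw'
    rw [List.foldl_cons]
    by_cases he : kw.isEmpty = true
    · rw [if_pos he, ih]
      have hkw : kw = [] := List.isEmpty_iff.mp he
      constructor
      · rintro (h | ⟨ha, hb, hc⟩)
        · exact Or.inl h
        · exact Or.inr ⟨List.mem_cons_of_mem _ ha, hb, hc⟩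
      · rintro (h | ⟨ha, hb, hc⟩)
        · exact Or.inl h
        · rcases List.mem_cons.mp ha with rfl | ha
          · exact absurd hkw hb
          · exact Or.inr ⟨ha, hb, hc⟩
    · rw [if_neg he, ih]
      have hkw : kw ≠ [] := by simpa [List.isEmpty_iff] using he
      by_cases hs : kw.getD 0 "" = s
      · subst hs
        rw [PySem.Dict.getD_insert_self]
        constructor
        · rintro (h | ⟨ha, hb, hc⟩)
          · rcases List.mem_append.mp h with h | h
            · exact Or.inl h
            · rcases List.mem_singleton.mp h with rfl
              exact Or.inr ⟨List.mem_cons_self .., hkw, rfl⟩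
          · exact Or.inr ⟨List.mem_cons_of_mem _ ha, hb, hc⟩
        · rintro (h | ⟨ha, hb, hc⟩)
          · exact Or.inl (List.mem_append.mpr (Or.inl h))
          · rcases List.mem_cons.mp ha with rfl | ha
            · exact Or.inl (List.mem_append.mpr (Or.inr (List.mem_singleton.mpr rfl)))
            · exact Or.inr ⟨ha, hb, hc⟩
      · rw [PySem.Dict.getD_insert_of_ne _ _ _ (fun h => hs (Eq.symm h))]
        constructor
        · rintro (h | ⟨ha, hb, hc⟩)
          · exact Or.inl h
          · exact Or.inr ⟨List.mem_cons_of_mem _ ha, hb, hc⟩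
        · rintro (h | ⟨ha, hb, hc⟩)
          · exact Or.inl h
          · rcases List.mem_cons.mp ha with rfl | ha
            · exact absurd hc hs
            · exact Or.inr ⟨ha, hb, hc⟩

-- B's inner candidate loop at one position
theorem pv_B_bucket_loop (tok : List String) :
    ∀ (L : List (List String)) (i : Nat), i < tok.length → ∀ (g : Nat → Bool),
    L.foldl (fun y kw =>
        if candOkB tok kw i then
          (List.range' i kw.length).foldl (fun y t => y.set t true) y
        else y) ((List.range tok.length).map g)
      = (List.range tok.length).map (fun j =>
          if L.any (fun kw => candOkB tok kw i && decide (i ≤ j) && decide (j < i + kw.length))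
          then true else g j) := by
  intro L
  induction L with
  | nil => intro i _ g; simp
  | cons kw L ih =>
    intro i hi g
    rw [List.foldl_cons]
    by_cases hc : candOkB tok kw i = true
    · rw [if_pos hc]
      have hb : i + kw.length ≤ tok.length := by
        have := hc
        unfold candOkB at this
        simp only [Bool.and_eq_true, decide_eq_true_eq] at this
        omega
      rw [pv_foldl_set_range' tok.length true kw.length i g hb, ih i hi _]
      apply List.map_congr_left; intro j _
      simp only [List.any_cons, hc, Bool.true_and]
      by_cases h1 : (L.any (fun kw => candOkB tok kw i && decide (i ≤ j) && decide (j < i + kw.length))) = true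
      · simp [h1]
      · by_cases h2 : i ≤ j ∧ j < i + kw.length
        · simp [h2.1, h2.2]
        · have h3 : ¬(i ≤ j) ∨ ¬(j < i + kw.length) := by tauto
          rcases h3 with h3 | h3 <;> simp [h1, h3]
    · rw [if_neg hc, ih i hi g]
      have hc' : candOkB tok kw i = false := by simpa using hc
      apply List.map_congr_left; intro j _
      simp [List.any_cons, hc']

-- B's position loop
theorem pv_B_pos_loop (tok : List String) (d : PySem.Dict String (List (List String))) :
    ∀ (m : Nat), m ≤ tok.length → ∀ (g : Nat → Bool),
    (List.range m).foldl (fun y i =>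
        (d.getD (tok.getD i "") []).foldl (fun y kw =>
          if candOkB tok kw i then
            (List.range' i kw.length).foldl (fun y t => y.set t true) y
          else y) y) ((List.range tok.length).map g)
      = (List.range tok.length).map (fun j =>
          if (List.range m).any (fun i => (d.getD (tok.getD i "") []).any
              (fun kw => candOkB tok kw i && decide (i ≤ j) && decide (j < i + kw.length)))
          then true else g j) := by
  intro m
  induction m with
  | zero => intro _ g; simp
  | succ m ih =>
    intro h g
    rw [List.range_succ, List.foldl_append, ih (by omega) g, List.foldl_cons, List.foldl_nil,
      pv_B_bucket_loop tok _ m (by omega) _]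
    apply List.map_congr_left; intro j _
    rw [List.any_append]
    simp only [List.any_cons, List.any_nil, Bool.or_false]
    exact pv_if_or _ _ _

-- the two keyword-hit conditions agree under Pre_
theorem pv_cond_iff (tok : List String) (kv : List (List String)) (j : Nat) (_hj : j < tok.length)
    (h2 : ∀ kw ∈ kv, kw ≠ [])
    (h3 : ∀ kw ∈ kv, ∀ i < tok.length, pvMatchesAtB tok kw i = true → i + kw.length ≤ tok.length) :
    (kv.any (fun kw => (List.range tok.length).any
        (fun i => pvMatchesAtB tok kw i && decide (i ≤ j) && decide (j < i + kw.length)))) =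
    ((List.range tok.length).any (fun i =>
        ((kv.foldl (fun d kw =>
            if kw.isEmpty then d
            else d.insert (kw.getD 0 "") (d.getD (kw.getD 0 "") [] ++ [kw]))
          (PySem.Dict.empty : PySem.Dict String (List (List String)))).getD (tok.getD i "") []).any
        (fun kw => candOkB tok kw i && decide (i ≤ j) && decide (j < i + kw.length)))) := by
  rw [Bool.eq_iff_iff]
  simp only [List.any_eq_true, List.mem_range, Bool.and_eq_true, decide_eq_true_eq]
  constructor
  · rintro ⟨kw, hkw, i, hi, ⟨hm, hij⟩, hjl⟩
    have hbound : i + kw.length ≤ tok.length := h3 kw hkw i hi hm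
    have hne : kw ≠ [] := h2 kw hkw
    have hlen : 0 < kw.length := List.length_pos_iff.mpr hne
    unfold pvMatchesAtB at hm
    simp only [Bool.and_eq_true, List.all_eq_true, List.mem_range, beq_iff_eq] at hm
    refine ⟨i, hi, kw, ?_, ⟨?_, hij⟩, hjl⟩
    · exact (pv_bucket_mem kv _ _ kw).mpr (Or.inr ⟨hkw, hne, hm.1.symm⟩)
    · unfold candOkB
      simp only [Bool.and_eq_true, decide_eq_true_eq, List.all_eq_true]
      refine ⟨by omega, ?_⟩
      intro t ht
      rcases List.mem_range'_1.mp ht with ⟨ht1, ht2⟩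
      have htl : t < kw.length := by omega
      have hin : i + t < tok.length := by omega
      have hmm := hm.2 t htl
      rw [Bool.or_eq_true, Bool.or_eq_true, Bool.not_eq_true', decide_eq_false_iff_not] at hmm
      rcases hmm with (h | h) | h
      · exact absurd hin h
      · rw [Bool.or_eq_true]; exact Or.inl h
      · rw [Bool.or_eq_true]; exact Or.inr h
  · rintro ⟨i, hi, kw, hbkt, ⟨hok, hij⟩, hjl⟩
    rcases (pv_bucket_mem kv _ _ kw).mp hbkt with h | ⟨hkw, hne, hhead⟩
    · simp at h
    · refine ⟨kw, hkw, i, hi, ⟨?_, hij⟩, hjl⟩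
      unfold candOkB at hok
      simp only [Bool.and_eq_true, decide_eq_true_eq, List.all_eq_true] at hok
      unfold pvMatchesAtB
      simp only [Bool.and_eq_true, List.all_eq_true, List.mem_range, Bool.or_eq_true,
        Bool.not_eq_true', decide_eq_false_iff_not, beq_iff_eq, Nat.not_lt]
      have hlen : 0 < kw.length := List.length_pos_iff.mpr hne
      refine ⟨hhead.symm, ?_⟩
      intro t ht
      by_cases hin : i + t < tok.length
      · rcases Nat.eq_zero_or_pos t with rfl | htpos
        · exact Or.inl (Or.inr (by rw [Nat.add_zero]; exact hhead.symm.symm))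
        · have hmem : t ∈ List.range' 1 (kw.length - 1) := List.mem_range'_1.mpr ⟨htpos, by omega⟩
          have h := hok.2 t hmem
          rw [Bool.or_eq_true, beq_iff_eq, beq_iff_eq] at h
          rcases h with h | h
          · exact Or.inl (Or.inr h)
          · exact Or.inr h
      · exact Or.inl (Or.inl (by omega))

-- ===== VERDICT (by name: the statement is the Claim_ definition above) =====
theorem create_sequence_keyword_feature_spec : Claim_equal_create_sequence_keyword_feature := by
  intro tok pos kv lang _hDom hPre
  obtain ⟨_h1, h2, h3⟩ := hPre
  unfold Spec_create_sequence_keyword_feature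
  simp only [create_sequence_keyword_feature, create_sequence_keyword_feature_alt]
  rw [pv_replicate_eq_map tok.length "NO", pv_replicate_eq_map tok.length false]
  rw [pv_foldl_guard_set tok.length _ "YES" tok.length _ le_rfl]
  rw [pv_A_kv_loop tok kv h3]
  by_cases hl : (lang == "en") = true
  · rw [if_pos hl, pv_foldl_guard_set tok.length _ true tok.length _ le_rfl,
      pv_B_pos_loop tok _ tok.length le_rfl, List.map_map]
    apply List.map_congr_left
    intro j hj
    rw [List.mem_range] at hj
    simp only [Function.comp_apply, hl, Bool.true_and]
    rw [← pv_cond_iff tok kv j hj (h2 (by omega)) h3]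
    by_cases cA : (kv.any (fun kw => (List.range tok.length).any
        (fun i => pvMatchesAtB tok kw i && decide (i ≤ j) && decide (j < i + kw.length)))) = true
    · simp [cA]
    · simp [cA]
  · have hl' : (lang == "en") = false := by simpa using hl
    rw [if_neg hl, pv_B_pos_loop tok _ tok.length le_rfl, List.map_map]
    apply List.map_congr_left
    intro j hj
    rw [List.mem_range] at hj
    simp only [Function.comp_apply, hl', Bool.false_and]
    rw [← pv_cond_iff tok kv j hj (h2 (by omega)) h3]
    by_cases cA : (kv.any (fun kw => (List.range tok.length).any
        (fun i => pvMatchesAtB tok kw i && decide (i ≤ j) && decide (j < i + kw.length)))) = true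
    · simp [cA]
    · simp [cA]
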